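-- pv_equiv track=rewrite | github.com/RicardG/WiFi-Traffic-Thesis | HelperFunctions.py | SafeMin
-- ===== SOURCE A (Python) =====
-- def SafeMin(l):
--     m = None
--     pos = None
--     p = 0
--     for i in l:
--         if (i is not None):
--             if (m is None or i < m):
--                 m = i
--                 pos = p
--         p += 1
--     return m, pos
-- ===== SOURCE B (Python) =====
-- def SafeMin(l):
--     order = sorted(((x, i) for i, x in enumerate(l) if x is not None),
--                    key=lambda t: t[0])
--     if not order:
--         return None, None
--     return order[0]
-- ===== Notes on version B (the rewrite author's own statement) =====
-- stated objective: alternative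
-- what changed: Instead of A's single running-min scan with m/pos/p state, B sorts the (value, index) candidate pairs by value with a stable sort and returns the first pair; stability gives A's earliest-minimum tie-breaking.
import Mathlib
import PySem

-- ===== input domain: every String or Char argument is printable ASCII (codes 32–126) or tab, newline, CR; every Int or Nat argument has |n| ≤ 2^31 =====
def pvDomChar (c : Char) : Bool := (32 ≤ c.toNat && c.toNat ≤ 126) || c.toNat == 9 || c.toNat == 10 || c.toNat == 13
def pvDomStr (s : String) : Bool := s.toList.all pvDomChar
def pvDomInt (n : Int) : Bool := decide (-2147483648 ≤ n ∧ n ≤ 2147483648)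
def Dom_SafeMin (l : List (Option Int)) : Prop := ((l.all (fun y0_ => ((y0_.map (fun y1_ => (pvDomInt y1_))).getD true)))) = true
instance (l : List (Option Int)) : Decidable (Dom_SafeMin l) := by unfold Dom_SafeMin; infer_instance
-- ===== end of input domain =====

-- B replaces A's running-min scan by a stable sort of the (value, index) candidate pairs by value, returning the first pair (alternative algorithm).

-- ===== PORT A =====
-- one iteration of A's for-loop over state (m, pos, p)
def SafeMinStep (s : Option Int × Option Int × Int) (i : Option Int) :
    Option Int × Option Int × Int :=
  match i, s with
  | none, (m, pos, p) => (m, pos, p + 1)          -- i is None: only p += 1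
  | some v, (m, pos, p) =>
    match m with
    | none => (some v, some p, p + 1)             -- m is None: take i
    | some mv => if v < mv then (some v, some p, p + 1) else (m, pos, p + 1)

def SafeMin (l : List (Option Int)) : Option Int × Option Int :=
  let r := l.foldl SafeMinStep (none, none, 0)
  (r.1, r.2.1)

-- ===== PORT B =====
def SafeMin_alt (l : List (Option Int)) : Option Int × Option Int :=
  let order := PySem.List.sorted
    ((PySem.List.enumerate l 0).filterMap (fun q => q.2.map (fun x => (x, q.1))))
    (fun t => t.1)
  match order with
  | [] => (none, none)
  | best :: _ => (some best.1, some best.2)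

-- ===== PRECONDITION & SPEC =====
def Spec_SafeMin (l : List (Option Int)) (out : Option Int × Option Int) : Prop := out = SafeMin_alt l
instance (l : List (Option Int)) (out : Option Int × Option Int) : Decidable (Spec_SafeMin l out) := by unfold Spec_SafeMin; infer_instance

-- ===== CLAIM (what is proved, stated in full; the proofs are below) =====
def Claim_equal_SafeMin : Prop := ∀ (l : List (Option Int)), Dom_SafeMin l → Spec_SafeMin l (SafeMin l)

-- ===== LEMMAS AND PROOFS =====

-- A's loop state corresponding to a running first-minimum accumulator, at position p
def pvSt (acc : Option (Int × Int)) (p : Int) : Option Int × Option Int × Int :=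
  match acc with
  | none => (none, none, p)
  | some (v, i) => (some v, some i, p)

-- final answer read off each side
def pvOutA (s : Option Int × Option Int × Int) : Option Int × Option Int := (s.1, s.2.1)

def pvOutB (acc : Option (Int × Int)) : Option Int × Option Int :=
  match acc with
  | none => (none, none)
  | some (v, i) => (some v, some i)

-- first-minimum accumulator step (keeps the earlier element on ties)
def pvStepB (acc : Option (Int × Int)) (x : Int × Int) : Option (Int × Int) :=
  match acc with
  | none => some x
  | some m => if x.1 < m.1 then some x else some m

def pvCands (l : List (Option Int)) (p : Int) : List (Int × Int) :=
  (PySem.List.enumerate l p).filterMap (fun q => q.2.map (fun x => (x, q.1)))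

lemma pv_fold_eq (l : List (Option Int)) : ∀ (p : Int) (acc : Option (Int × Int)),
    pvOutA (l.foldl SafeMinStep (pvSt acc p)) = pvOutB ((pvCands l p).foldl pvStepB acc) := by
  induction l with
  | nil => intro p acc; cases acc with
    | none => rfl
    | some b => rcases b with ⟨v, i⟩; rfl
  | cons h t ih =>
    intro p acc
    cases h with
    | none =>
      have hs : SafeMinStep (pvSt acc p) none = pvSt acc (p + 1) := by
        cases acc with
        | none => rfl
        | some b => rcases b with ⟨v, i⟩; rfl
      have hc : pvCands (none :: t) p = pvCands t (p + 1) := by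
        simp [pvCands, PySem.List.enumerate_cons]
      simp only [List.foldl_cons, hs, hc, ih]
    | some v =>
      have hc : pvCands (some v :: t) p = (v, p) :: pvCands t (p + 1) := by
        simp [pvCands, PySem.List.enumerate_cons]
      cases acc with
      | none =>
        have hs : SafeMinStep (pvSt none p) (some v) = pvSt (some (v, p)) (p + 1) := rfl
        simp only [List.foldl_cons, hs, hc, pvStepB, ih]
      | some b =>
        rcases b with ⟨mv, i⟩
        by_cases hlt : v < mv
        · have hs : SafeMinStep (pvSt (some (mv, i)) p) (some v) = pvSt (some (v, p)) (p + 1) := by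
            simp [pvSt, SafeMinStep, hlt]
          have hb : pvStepB (some (mv, i)) (v, p) = some (v, p) := by simp [pvStepB, hlt]
          simp only [List.foldl_cons, hs, hc, hb, ih]
        · have hs : SafeMinStep (pvSt (some (mv, i)) p) (some v) = pvSt (some (mv, i)) (p + 1) := by
            simp [pvSt, SafeMinStep, hlt]
          have hb : pvStepB (some (mv, i)) (v, p) = some (mv, i) := by simp [pvStepB, hlt]
          simp only [List.foldl_cons, hs, hc, hb, ih]

-- head of a stable insertion step, as the first-minimum accumulator step
lemma pv_head_insertBy (x : Int × Int) (acc : List (Int × Int)) :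
    (PySem.List.insertBy (fun a b : Int × Int => decide (a.1 < b.1)) x acc).head?
      = (pvStepB acc.head? x).map id := by
  cases acc with
  | nil => rfl
  | cons y ys =>
    by_cases h : x.1 < y.1
    · simp [PySem.List.insertBy, pvStepB, h]
    · simp [PySem.List.insertBy, pvStepB, h]

-- head of the insertion-sort fold is the first-minimum fold
lemma pv_head_fold (cs : List (Int × Int)) : ∀ (acc : List (Int × Int)),
    (cs.foldl (fun a x => PySem.List.insertBy (fun a b : Int × Int => decide (a.1 < b.1)) x a) acc).head?
      = cs.foldl pvStepB acc.head? := by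
  induction cs with
  | nil => intro acc; rfl
  | cons x t ih =>
    intro acc
    have h := pv_head_insertBy x acc
    simp only [Option.map_id] at h
    simp only [List.foldl_cons, ih, h, id]

-- ===== VERDICT (by name: the statement is the Claim_ definition above) =====
theorem SafeMin_spec : Claim_equal_SafeMin := by
  intro l _
  unfold Spec_SafeMin SafeMin SafeMin_alt
  have h := pv_fold_eq l 0 none
  simp only [pvOutA, pvSt] at h
  have hsort : PySem.List.sorted (pvCands l 0) (fun t => t.1) false
      = (pvCands l 0).foldl (fun a x => PySem.List.insertBy (fun a b : Int × Int => decide (a.1 < b.1)) x a) [] :=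
    PySem.List.sorted_eq_foldl_insertBy _ _
  have hhead := pv_head_fold (pvCands l 0) []
  rw [← hsort] at hhead
  rw [show ([] : List (Int × Int)).head? = none from rfl] at hhead
  have hc : ((PySem.List.enumerate l 0).filterMap (fun q => q.2.map (fun x => (x, q.1)))) = pvCands l 0 := rfl
  simp only [hc, h]
  cases hs : PySem.List.sorted (pvCands l 0) (fun t => t.1) false with
  | nil =>
    rw [hs] at hhead
    simp only [List.head?_nil] at hhead
    rw [← hhead]
    rfl
  | cons b rest =>
    rw [hs] at hhead
    simp only [List.head?_cons] at hhead
    rw [← hhead]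
    rcases b with ⟨v, i⟩
    rfl
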